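-- pv_equiv track=rewrite | github.com/Ayanami-E/-HEAL-KGGen | kg_enhancement.py | format_entity_highlights
-- ===== SOURCE A (Python) =====
-- def format_entity_highlights(entities):
--     """Format extracted entities for display in the prompt"""
--     if not entities:
--         return "No relevant medical entities identified."
--
--     result = ""
--     entities_by_category = {}
--
--     # Group entities by category
--     for entity in entities:
--         category = entity.get("category", "unknown")
--         if category not in entities_by_category:
--             entities_by_category[category] = []
--         entities_by_category[category].append(entity)
--
--     # Format entity information by category
--     for category, category_entities in entities_by_category.items():
--         if category_entities:
--             result += f"\n{category.capitalize()}:\n"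
--             for entity in category_entities:
--                 result += f"- {entity.get('name', '')}\n"
--
--     return result
-- ===== SOURCE B (Python) =====
-- def format_entity_highlights(entities):
--     """Format extracted entities for display in the prompt"""
--     if not entities:
--         return "No relevant medical entities identified."
--
--     # distinct categories in first-appearance order
--     categories = []
--     for entity in entities:
--         category = entity.get("category", "unknown")
--         if category not in categories:
--             categories.append(category)
--
--     result = ""
--     for category in categories:
--         result += f"\n{category.capitalize()}:\n"
--         for entity in entities:
--             if entity.get("category", "unknown") == category:
--                 result += f"- {entity.get('name', '')}\n"
--     return result
-- ===== Notes on version B (the rewrite author's own statement) =====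
-- stated objective: alternative
-- what changed: Replaces the intermediate category->entities dict with a first-seen list of distinct categories followed by a per-category rescan of the entities.
import Mathlib
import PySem

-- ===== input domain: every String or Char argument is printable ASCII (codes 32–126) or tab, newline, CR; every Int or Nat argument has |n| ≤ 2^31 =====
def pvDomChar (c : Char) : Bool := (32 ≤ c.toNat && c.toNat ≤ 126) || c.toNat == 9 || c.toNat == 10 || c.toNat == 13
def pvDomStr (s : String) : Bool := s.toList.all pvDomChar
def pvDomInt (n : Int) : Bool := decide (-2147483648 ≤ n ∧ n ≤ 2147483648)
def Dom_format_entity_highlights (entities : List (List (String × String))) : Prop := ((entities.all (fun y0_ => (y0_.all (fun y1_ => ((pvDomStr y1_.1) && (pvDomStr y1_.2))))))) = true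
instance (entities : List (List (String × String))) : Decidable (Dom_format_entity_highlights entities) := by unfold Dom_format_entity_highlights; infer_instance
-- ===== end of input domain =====

-- B replaces A's category→entities dict by a first-seen category list plus a per-category
-- rescan of the entities (objective: alternative decomposition, same output).

-- shared helpers (both Pythons call .get with the same defaults and .capitalize())
-- s.capitalize(): first char uppercased, rest lowercased — exact on the ASCII domain
def pyCapitalize (s : String) : String :=
  match s.toList with
  | [] => s
  | c :: rest => String.ofList (PySem.Chars.upperChar c :: PySem.Chars.lower rest)

def pyGetCat (e : List (String × String)) : String :=
  (PySem.Dict.mk e).getD "category" "unknown"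

def pyGetName (e : List (String × String)) : String :=
  (PySem.Dict.mk e).getD "name" ""

-- ===== PORT A =====
-- 'if category not in d: d[category] = []' followed by 'd[category].append(entity)'
-- is exactly Dict.modify category [] (· ++ [entity]) (absent key appended at the end).
def format_entity_highlights (entities : List (List (String × String))) : String :=
  if entities = [] then "No relevant medical entities identified."
  else
    let result := ""
    let entities_by_category :=
      entities.foldl (fun d e => d.modify (pyGetCat e) [] (· ++ [e]))
        (PySem.Dict.empty : PySem.Dict String (List (List (String × String))))
    entities_by_category.items.foldl
      (fun r p =>
        if p.2 ≠ [] then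
          p.2.foldl (fun r e => r ++ "- " ++ pyGetName e ++ "\n")
            (r ++ "\n" ++ pyCapitalize p.1 ++ ":\n")
        else r)
      result

-- ===== PORT B =====
def format_entity_highlights_alt (entities : List (List (String × String))) : String :=
  if entities = [] then "No relevant medical entities identified."
  else
    let categories :=
      entities.foldl (fun cs e => if pyGetCat e ∈ cs then cs else cs ++ [pyGetCat e]) []
    categories.foldl
      (fun r c =>
        entities.foldl
          (fun r e => if pyGetCat e = c then r ++ "- " ++ pyGetName e ++ "\n" else r)
          (r ++ "\n" ++ pyCapitalize c ++ ":\n"))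
      ""

-- ===== PRECONDITION & SPEC =====
def Spec_format_entity_highlights (entities : List (List (String × String))) (out : String) : Prop := out = format_entity_highlights_alt entities
instance (entities : List (List (String × String))) (out : String) : Decidable (Spec_format_entity_highlights entities out) := by unfold Spec_format_entity_highlights; infer_instance

-- ===== CLAIM (what is proved, stated in full; the proofs are below) =====
def Claim_equal_format_entity_highlights : Prop := ∀ (entities : List (List (String × String))), Dom_format_entity_highlights entities → Spec_format_entity_highlights entities (format_entity_highlights entities)

-- ===== LEMMAS AND PROOFS =====

-- A's grouping dict: its keys are the distinct categories in first-seen order …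
theorem keys_group (entities : List (List (String × String))) :
    (entities.foldl (fun d e => d.modify (pyGetCat e) [] (· ++ [e]))
        (PySem.Dict.empty : PySem.Dict String (List (List (String × String))))).keys
      = PySem.Set.ofList (entities.map pyGetCat) := by
  rw [PySem.Dict.keys_foldl_modify_key entities pyGetCat [] (fun _ e => (· ++ [e]))]
  simp [PySem.Set.update, PySem.Set.ofList_eq_foldl, PySem.Dict.keys]
  rfl

theorem nodup_keys_group (entities : List (List (String × String))) :
    (entities.foldl (fun d e => d.modify (pyGetCat e) [] (· ++ [e]))
        (PySem.Dict.empty : PySem.Dict String (List (List (String × String))))).keys.Nodup := by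
  exact PySem.Dict.nodup_keys_foldl_modify_key entities pyGetCat [] (fun _ e => (· ++ [e])) _
    PySem.Dict.nodup_keys_empty

-- … and its value at c is the sublist of entities with category c.
theorem getD_group (entities : List (List (String × String))) (c : String) :
    (entities.foldl (fun d e => d.modify (pyGetCat e) [] (· ++ [e]))
        (PySem.Dict.empty : PySem.Dict String (List (List (String × String))))).getD c []
      = entities.filter (fun e => pyGetCat e == c) := by
  have h := PySem.Dict.getD_foldl_modify_append
      (entities.map (fun e => (pyGetCat e, e)))
      (PySem.Dict.empty : PySem.Dict String (List (List (String × String)))) c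
  rw [List.foldl_map] at h
  simpa [List.filter_map, Function.comp_def] using h

-- B's first pass builds exactly those distinct categories.
theorem cats_eq (entities : List (List (String × String))) :
    entities.foldl (fun cs e => if pyGetCat e ∈ cs then cs else cs ++ [pyGetCat e]) []
      = PySem.Set.ofList (entities.map pyGetCat) := by
  rw [PySem.Set.ofList_eq_foldl, List.foldl_map]
  apply PySem.List.foldl_congr_mem
  intro acc x _
  simp [PySem.Set.add]

-- ===== VERDICT (by name: the statement is the Claim_ definition above) =====
theorem format_entity_highlights_spec : Claim_equal_format_entity_highlights := by
  intro entities _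
  unfold Spec_format_entity_highlights format_entity_highlights format_entity_highlights_alt
  by_cases hne : entities = []
  · simp [hne]
  · simp only [hne, if_false]
    rw [cats_eq]
    have hkeys := keys_group entities
    have hnd := nodup_keys_group entities
    rw [PySem.Dict.items_eq_map_keys _ hnd [], List.foldl_map, hkeys]
    apply PySem.List.foldl_congr_mem
    intro acc c hc
    have hmem : c ∈ entities.map pyGetCat := (PySem.Set.mem_ofList _ _).mp hc
    rw [getD_group]
    have hfil : entities.filter (fun e => pyGetCat e == c) ≠ [] := by
      rcases List.mem_map.mp hmem with ⟨e, he, hce⟩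
      intro hnil
      have : e ∈ entities.filter (fun e => pyGetCat e == c) :=
        List.mem_filter.mpr ⟨he, by simp [hce]⟩
      simp [hnil] at this
    rw [if_pos hfil, List.foldl_filter]
    apply PySem.List.foldl_congr_mem
    intro acc' e _
    by_cases h : pyGetCat e = c <;> simp [h]
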